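-- pv_equiv track=rewrite | github.com/samcarey/whoeverwants | server/algorithms/poll_title.py | _shared_context
-- ===== SOURCE A (Python) =====
-- def _shared_context(contexts: list[str | None]) -> str | None:
--     """Return the single context shared by every question, or None when any
--     context is missing or the values diverge. Comparison is
--     case-insensitive but the returned string preserves the first occurrence's
--     casing."""
--     if not contexts:
--         return None
--     normalized = [(c or "").strip() for c in contexts]
--     if not all(normalized):
--         return None
--     if len({c.lower() for c in normalized}) != 1:
--         return None
--     return normalized[0]
-- ===== SOURCE B (Python) =====
-- def _shared_context(contexts: list[str | None]) -> str | None: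
--     """Single pass keeping two scalars: the first stripped context and its
--     lowercase form; bail out on any missing/divergent context."""
--     first = None
--     ref = None
--     for c in contexts:
--         s = (c or "").strip()
--         if not s:
--             return None
--         if first is None:
--             first = s
--             ref = s.lower()
--         elif s.lower() != ref:
--             return None
--     return first
-- ===== Notes on version B (the rewrite author's own statement) =====
-- stated objective: simpler
-- what changed: Replaced A's three passes (build a normalized list, all() over it, a set comprehension of lowercased values) with one early-exit loop that keeps only two scalars: the first stripped context and its lowercase form.
import Mathlib
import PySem

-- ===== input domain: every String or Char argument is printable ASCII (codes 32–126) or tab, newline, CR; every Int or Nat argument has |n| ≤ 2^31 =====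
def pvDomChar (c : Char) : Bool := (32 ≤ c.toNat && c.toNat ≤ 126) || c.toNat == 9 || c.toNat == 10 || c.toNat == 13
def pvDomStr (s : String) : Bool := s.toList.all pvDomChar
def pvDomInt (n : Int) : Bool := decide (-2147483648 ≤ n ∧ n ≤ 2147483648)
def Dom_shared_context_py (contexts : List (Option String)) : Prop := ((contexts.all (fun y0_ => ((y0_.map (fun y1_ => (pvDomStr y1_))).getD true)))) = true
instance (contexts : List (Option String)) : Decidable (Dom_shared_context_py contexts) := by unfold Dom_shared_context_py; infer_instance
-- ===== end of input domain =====

-- B replaces A's three passes (normalized list, all(), lowercase set) by one loop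
-- keeping two scalars (first stripped value and its lowercase); objective: simpler.

-- ===== PORT A =====
def shared_context_py (contexts : List (Option String)) : Option String :=
  if contexts.isEmpty then none
  else
    let normalized := contexts.map (fun c => PySem.Str.strip (c.getD ""))
    if !(normalized.all (fun s => !(s == ""))) then none
    else if (PySem.Set.ofList (normalized.map (fun s => PySem.Str.lower s))).length ≠ 1 then none
    else some (PySem.List.pyGetD normalized 0 "")

-- ===== PORT B =====
-- the loop after `first`/`ref` have been set (B's `elif` arm)
def sharedLoop (first ref : String) : List (Option String) → Option String
  | [] => some first
  | c :: rest =>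
    let s := PySem.Str.strip (c.getD "")
    if s == "" then none
    else if PySem.Str.lower s == ref then sharedLoop first ref rest
    else none

def shared_context_py_alt (contexts : List (Option String)) : Option String :=
  match contexts with
  | [] => none
  | c :: rest =>
    let s := PySem.Str.strip (c.getD "")
    if s == "" then none
    else sharedLoop s (PySem.Str.lower s) rest

-- ===== PRECONDITION & SPEC =====
def Spec_shared_context_py (contexts : List (Option String)) (out : Option String) : Prop := out = shared_context_py_alt contexts
instance (contexts : List (Option String)) (out : Option String) : Decidable (Spec_shared_context_py contexts out) := by unfold Spec_shared_context_py; infer_instance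

-- ===== CLAIM (what is proved, stated in full; the proofs are below) =====
def Claim_equal_shared_context_py : Prop := ∀ (contexts : List (Option String)), Dom_shared_context_py contexts → Spec_shared_context_py contexts (shared_context_py contexts)

-- ===== LEMMAS AND PROOFS =====

-- B's loop returns `some first` iff every remaining context strips nonempty and lowers to `ref`
theorem sharedLoop_char (first ref : String) (rest : List (Option String)) :
    sharedLoop first ref rest =
      if rest.all (fun c => !(PySem.Str.strip (c.getD "") == "")
          && (PySem.Str.lower (PySem.Str.strip (c.getD "")) == ref))
      then some first else none := by
  induction rest with
  | nil => rfl
  | cons c rest ih =>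
      simp only [sharedLoop, List.all_cons, ih]
      by_cases h1 : PySem.Str.strip (c.getD "") = ""
      · simp [h1]
      · by_cases h2 : PySem.Str.lower (PySem.Str.strip (c.getD "")) = ref
        · simp [h1, h2]
        · simp [h1, h2]

-- a one-element seed: set(x :: l) is a singleton iff every element of l equals x
theorem set_cons_len_one (x : String) (l : List String) :
    (PySem.Set.ofList (x :: l)).length = 1 ↔ ∀ y ∈ l, y = x := by
  constructor
  · intro h y hy
    have hx : x ∈ PySem.Set.ofList (x :: l) := by simp [PySem.Set.mem_ofList]
    have hyS : y ∈ PySem.Set.ofList (x :: l) := by simp [PySem.Set.mem_ofList, hy]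
    match hS : PySem.Set.ofList (x :: l), h with
    | [a], _ =>
      rw [hS] at hx hyS; simp at hx hyS; rw [hx, hyS]
  · intro h
    rw [PySem.Set.ofList_cons]
    have hsub : ∀ y ∈ PySem.Set.ofList l, y = x := fun y hy => h y ((PySem.Set.mem_ofList l y).1 hy)
    have hnd : (PySem.Set.ofList l).Nodup := PySem.Set.nodup_ofList l
    match e : PySem.Set.ofList l with
    | [] => simp [PySem.Set.discard]
    | a :: t =>
        rw [e] at hsub hnd
        have ha : a = x := hsub a (by simp)
        have ht : t = [] := by
          rcases t with _ | ⟨b, t⟩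
          · rfl
          · exfalso
            have hb : b = x := hsub b (by simp)
            simp [ha, hb] at hnd
        subst ht ha
        simp [PySem.Set.discard]

-- ===== VERDICT (by name: the statement is the Claim_ definition above) =====
theorem shared_context_py_spec : Claim_equal_shared_context_py := by
  intro contexts _
  unfold Spec_shared_context_py
  cases contexts with
  | nil => rfl
  | cons c rest =>
      simp only [shared_context_py, shared_context_py_alt, List.isEmpty_cons, List.map_cons,
        List.all_cons, if_false, Bool.false_eq_true, sharedLoop_char]
      by_cases h0 : PySem.Str.strip (c.getD "") = ""
      · simp [h0]
      · simp only [h0, beq_iff_eq, if_false, Bool.not_eq_eq_eq_not, Bool.not_true, List.all_eq_true]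
        by_cases hall : ∀ x ∈ rest, ¬ PySem.Str.strip (x.getD "") = ""
        · have hc1 : ((List.map (fun c => PySem.Str.strip (c.getD "")) rest).all
              fun s => !s == "") = true := by
            simp only [List.all_map, List.all_eq_true, Function.comp]
            intro x hx
            simpa using hall x hx
          have hC2 : (List.length (PySem.Set.ofList
              (PySem.Str.lower (PySem.Str.strip (c.getD "")) ::
                List.map (fun s => PySem.Str.lower s)
                  (List.map (fun c => PySem.Str.strip (c.getD "")) rest))) = 1) ↔
              ∀ x ∈ rest, PySem.Str.lower (PySem.Str.strip (x.getD ""))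
                = PySem.Str.lower (PySem.Str.strip (c.getD "")) := by
            rw [set_cons_len_one]
            constructor
            · intro h x hx
              exact h _ (List.mem_map.2 ⟨_, List.mem_map.2 ⟨x, hx, rfl⟩, rfl⟩)
            · intro h y hy
              rcases List.mem_map.1 hy with ⟨s, hs, rfl⟩
              rcases List.mem_map.1 hs with ⟨x, hx, rfl⟩
              exact h x hx
          rw [hc1]
          by_cases heq : ∀ x ∈ rest, PySem.Str.lower (PySem.Str.strip (x.getD ""))
              = PySem.Str.lower (PySem.Str.strip (c.getD ""))
          · rw [if_neg (by simp [h0]), if_neg (not_not_intro (hC2.2 heq)),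
              if_pos (by intro x hx; simp [hall x hx, heq x hx]),
              PySem.List.pyGetD_zero_cons]
          · push Not at heq
            obtain ⟨x, hx, hne⟩ := heq
            rw [if_neg (by simp [h0]), if_pos (fun h1 => hne ((hC2.1 h1) x hx)),
              if_neg (by intro h; have := h x hx; simp [hall x hx] at this; exact hne this)]
        · push Not at hall
          obtain ⟨x, hx, hemp⟩ := hall
          have hc1 : ((List.map (fun c => PySem.Str.strip (c.getD "")) rest).all
              fun s => !s == "") = false := by
            simp only [List.all_map, List.all_eq_false, Function.comp]
            exact ⟨x, hx, by simp [hemp]⟩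
          rw [hc1, Bool.and_false, if_pos rfl,
            if_neg (by intro h; have := h x hx; simp [hemp] at this)]
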